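-- pv_equiv track=rewrite | github.com/GingerNinja21/Check-In-Analytics | app.py | LDA
-- ===== SOURCE A (Python) =====
-- from collections import Counter
--
-- def LDA(tokens, themes_dict, top_n=5):
--     # This function takes a list of tokens and filters through  #
--     # a dictionary of themes in order to return the Top 5 Themes#
--     # NOTE: This is based of word occurence rather ran LDA      #
--
--     token_counts = Counter(tokens)
--     theme_scores = {}
--
--     for theme, keywords in themes_dict.items():
--         score = sum(token_counts.get(word, 0) for word in keywords)
--         theme_scores[theme] = score
--
--     # Sort themes from highest score to lowest
--     sorted_themes = sorted(theme_scores.items(), key=lambda x: x[1], reverse=True)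
--
--     # Filter out zero-score themes
--     sorted_themes = [t for t in sorted_themes if t[1] > 0]
--
--     # Return only the top N
--     return sorted_themes[:top_n]
-- ===== SOURCE B (Python) =====
-- from collections import Counter
--
-- def LDA(tokens, themes_dict, top_n=5):
--     # Inverted index: keyword -> themes (one entry per keyword occurrence)
--     index = {}
--     for theme, keywords in themes_dict.items():
--         for word in keywords:
--             index.setdefault(word, []).append(theme)
--     theme_scores = {theme: 0 for theme in themes_dict}
--     for word, count in Counter(tokens).items():
--         for t in index.get(word, ()):
--             theme_scores[t] += count
--     sorted_themes = sorted(theme_scores.items(), key=lambda x: x[1], reverse=True)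
--     return [t for t in sorted_themes if t[1] > 0][:top_n]
-- ===== Notes on version B (the rewrite author's own statement) =====
-- stated objective: alternative
-- what changed: B builds an inverted keyword->themes index and a zero-initialized score table once, then walks Counter(tokens).items() adding each distinct token's count to every theme that lists it, instead of A's per-theme rescan of the token counter; sorting, zero-filter and slicing are unchanged. Pre_ only excludes association lists with duplicate theme keys, which cannot arise from a Python dict argument.
import Mathlib
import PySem

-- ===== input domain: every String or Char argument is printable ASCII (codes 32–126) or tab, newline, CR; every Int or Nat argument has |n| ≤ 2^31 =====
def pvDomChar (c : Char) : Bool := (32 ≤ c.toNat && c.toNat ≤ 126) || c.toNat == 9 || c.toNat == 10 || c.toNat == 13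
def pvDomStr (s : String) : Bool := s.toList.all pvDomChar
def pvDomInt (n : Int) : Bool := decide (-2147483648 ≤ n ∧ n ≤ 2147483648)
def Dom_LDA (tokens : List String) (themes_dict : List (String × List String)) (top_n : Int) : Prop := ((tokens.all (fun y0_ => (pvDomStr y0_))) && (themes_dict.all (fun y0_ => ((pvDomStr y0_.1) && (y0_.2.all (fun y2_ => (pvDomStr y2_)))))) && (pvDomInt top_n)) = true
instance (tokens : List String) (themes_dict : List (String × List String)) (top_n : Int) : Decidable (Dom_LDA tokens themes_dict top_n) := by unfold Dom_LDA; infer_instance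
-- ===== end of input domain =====

-- B replaces A's per-theme rescan of the token counter by an inverted keyword->themes index
-- walked once per distinct token (objective: alternative decomposition; same observable result).


-- ===== PORT A =====
def LDA (tokens : List String) (themes_dict : List (String × List String)) (top_n : Int) : List (String × Int) :=
  let token_counts := PySem.Dict.counter tokens
  let theme_scores := themes_dict.foldl
    (fun d p => d.insert p.1 ((p.2.map (fun w => token_counts.getD w 0)).sum))
    PySem.Dict.empty
  let sorted_themes := PySem.List.sorted theme_scores.items (fun x => x.2) true
  let sorted_themes2 := sorted_themes.filter (fun t => decide (t.2 > 0))
  PySem.List.slice sorted_themes2 none (some top_n)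

-- ===== PORT B =====
def LDA_alt (tokens : List String) (themes_dict : List (String × List String)) (top_n : Int) : List (String × Int) :=
  -- index.setdefault(word, []).append(theme)  ==  index[w] = index.get(w, []) + [theme]  ==  Dict.modify
  let index := themes_dict.foldl
    (fun d p => p.2.foldl (fun d w => d.modify w [] (· ++ [p.1])) d)
    PySem.Dict.empty
  let theme_scores := themes_dict.foldl (fun d p => d.insert p.1 (0 : Int)) PySem.Dict.empty
  let theme_scores2 := (PySem.Dict.counter tokens).items.foldl
    (fun d wc => (index.getD wc.1 []).foldl (fun d t => d.modify t 0 (· + wc.2)) d)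
    theme_scores
  let sorted_themes := PySem.List.sorted theme_scores2.items (fun x => x.2) true
  let sorted_themes2 := sorted_themes.filter (fun t => decide (t.2 > 0))
  PySem.List.slice sorted_themes2 none (some top_n)

-- ===== PRECONDITION & SPEC =====
-- Pre_ excludes themes_dict with duplicate theme keys: a Python dict argument can never carry
-- duplicate keys, so such association lists correspond to no Python input; on them A's
-- keep-last-score and B's accumulate-both are both accidental behaviours of the list model.
def Pre_LDA (tokens : List String) (themes_dict : List (String × List String)) (top_n : Int) : Prop :=
  (themes_dict.map (·.1)).Nodup
instance (tokens : List String) (themes_dict : List (String × List String)) (top_n : Int) : Decidable (Pre_LDA tokens themes_dict top_n) := by unfold Pre_LDA; infer_instance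

def pvWitness_LDA : List String × (List (String × List String)) × Int :=
  (["a", "b", "a"], [("t1", ["a", "c"]), ("t2", ["b", "b"])], 5)

def Spec_LDA (tokens : List String) (themes_dict : List (String × List String)) (top_n : Int) (out : List (String × Int)) : Prop := out = LDA_alt tokens themes_dict top_n
instance (tokens : List String) (themes_dict : List (String × List String)) (top_n : Int) (out : List (String × Int)) : Decidable (Spec_LDA tokens themes_dict top_n out) := by unfold Spec_LDA; infer_instance

-- ===== CLAIM (what is proved, stated in full; the proofs are below) =====
def Claim_equal_LDA : Prop := ∀ (tokens : List String) (themes_dict : List (String × List String)) (top_n : Int), Dom_LDA tokens themes_dict top_n → Pre_LDA tokens themes_dict top_n → Spec_LDA tokens themes_dict top_n (LDA tokens themes_dict top_n)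

-- ===== LEMMAS AND PROOFS =====

-- Summing a list of Int-lists obtained by flatMap, grouped per outer element.
theorem pv_sum_flatMap {α : Type} (l : List α) (g : α → List Int) :
    (l.flatMap g).sum = (l.map (fun a => (g a).sum)).sum := by
  induction l with
  | nil => rfl
  | cons x t ih => simp [List.flatMap_cons, ih]

-- Summing an "if key = t" selector over a nodup-keyed association list picks the unique entry.
theorem pv_sum_map_ite_fst {β M : Type} [AddCommMonoid M] (l : List (String × β)) (t : String)
    (kws : β) (f : β → M) (hnd : (l.map (·.1)).Nodup) (hmem : (t, kws) ∈ l) :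
    (l.map (fun p => if p.1 = t then f p.2 else 0)).sum = f kws := by
  induction l with
  | nil => cases hmem
  | cons x xs ih =>
    simp only [List.map_cons, List.nodup_cons] at hnd
    rcases List.mem_cons.1 hmem with h | h
    · subst h
      simp only [List.map_cons, List.sum_cons]
      have hz : ∀ p ∈ xs, (if (p : String × β).1 = t then f p.2 else 0) = 0 := by
        intro p hp
        have hne : p.1 ≠ t := by
          intro he
          have : p.1 ∈ xs.map (·.1) := List.mem_map_of_mem hp
          rw [he] at this
          exact hnd.1 this
        simp [hne]
      rw [List.map_congr_left hz]
      simp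
    · have hx : x.1 ≠ t := by
        intro he
        have : (t, kws).1 ∈ xs.map (·.1) := List.mem_map_of_mem h
        rw [← he] at this
        exact hnd.1 this
      simp only [List.map_cons, List.sum_cons, if_neg hx, zero_add]
      exact ih hnd.2 h

-- Summing an "if w = k" selector over a nodup list containing k picks f k.
theorem pv_sum_map_ite_self {M : Type} [AddCommMonoid M] (S : List String) (k : String)
    (f : String → M) (hnd : S.Nodup) (hk : k ∈ S) :
    (S.map (fun w => if w = k then f w else 0)).sum = f k := by
  induction S with
  | nil => cases hk
  | cons x xs ih =>
    rw [List.nodup_cons] at hnd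
    rcases List.mem_cons.1 hk with h | h
    · subst h
      simp only [List.map_cons, List.sum_cons]
      have hz : ∀ w ∈ xs, (if w = k then f w else 0) = 0 := by
        intro w hw
        have : w ≠ k := fun he => hnd.1 (he ▸ hw)
        simp [this]
      rw [List.map_congr_left hz]
      simp
    · have hx : x ≠ k := fun he => hnd.1 (he ▸ h)
      simp only [List.map_cons, List.sum_cons, if_neg hx, zero_add]
      exact ih hnd.2 h

-- A fold of "d[t] += c" updates, read back pointwise.
theorem pv_getD_foldl_modify_add (L : List (String × Int)) (d : PySem.Dict String Int) (x : String) :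
    (L.foldl (fun d q => d.modify q.1 0 (· + q.2)) d).getD x 0
      = d.getD x 0 + ((L.filter (fun q => q.1 == x)).map (·.2)).sum := by
  induction L generalizing d with
  | nil => simp
  | cons q t ih =>
    simp only [List.foldl_cons, List.filter_cons]
    by_cases h : q.1 = x
    · simp only [h, beq_self_eq_true, if_pos, ih, PySem.Dict.getD_modify, List.map_cons,
        List.sum_cons]
      ring
    · have hb : (q.1 == x) = false := beq_eq_false_iff_ne.2 h
      have hx : x ≠ q.1 := fun he => h he.symm
      simp only [hb, Bool.false_eq_true, if_false, ih, PySem.Dict.getD_modify, if_neg hx]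

-- Exchange: summing token counts over keyword occurrences = summing keyword multiplicities
-- over distinct tokens.
theorem pv_sum_count_exchange (tokens kws : List String) :
    ((PySem.Set.ofList tokens).map
      (fun w => (kws.count w : Int) * (tokens.count w : Int))).sum
      = (kws.map (fun w => (tokens.count w : Int))).sum := by
  induction kws with
  | nil => simp
  | cons k t ih =>
    have hstep : ∀ w ∈ PySem.Set.ofList tokens,
        ((k :: t).count w : Int) * (tokens.count w : Int)
          = (t.count w : Int) * (tokens.count w : Int)
            + (if w = k then (tokens.count w : Int) else 0) := by
      intro w _
      by_cases h : w = k
      · subst h; simp; ring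
      · have h' : ¬ (k = w) := fun he => h he.symm
        simp [h, h']
    calc ((PySem.Set.ofList tokens).map
            (fun w => ((k :: t).count w : Int) * (tokens.count w : Int))).sum
        = ((PySem.Set.ofList tokens).map
            (fun w => (t.count w : Int) * (tokens.count w : Int)
              + (if w = k then (tokens.count w : Int) else 0))).sum :=
          congrArg List.sum (List.map_congr_left hstep)
      _ = ((PySem.Set.ofList tokens).map
            (fun w => (t.count w : Int) * (tokens.count w : Int))).sum
          + ((PySem.Set.ofList tokens).map
            (fun w => if w = k then (tokens.count w : Int) else 0)).sum :=
          PySem.List.sum_map_add_int _ _ _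
      _ = (t.map (fun w => (tokens.count w : Int))).sum + (tokens.count k : Int) := by
          rw [ih]
          congr 1
          by_cases hk : k ∈ tokens
          · exact pv_sum_map_ite_self _ k _ (PySem.Set.nodup_ofList tokens)
              ((PySem.Set.mem_ofList tokens k).2 hk)
          · have h0 : tokens.count k = 0 := List.count_eq_zero.2 hk
            have hz : ∀ w ∈ PySem.Set.ofList tokens,
                (if w = k then (tokens.count w : Int) else 0) = 0 := by
              intro w hw
              have : w ≠ k := by
                intro he
                exact hk (he ▸ (PySem.Set.mem_ofList tokens w).1 hw)
              simp [this]
            rw [List.map_congr_left hz]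
            simp [h0]
      _ = (((k :: t).map (fun w => (tokens.count w : Int)))).sum := by
          simp only [List.map_cons, List.sum_cons]
          ring

-- Core: A's score dict and B's score dict have the same items list.
theorem pv_items_eq (tokens : List String) (themes : List (String × List String))
    (hnd : (themes.map (·.1)).Nodup) :
    (themes.foldl
        (fun d p => d.insert p.1 ((p.2.map (fun w => (PySem.Dict.counter tokens).getD w 0)).sum))
        PySem.Dict.empty).items
      = ((PySem.Dict.counter tokens).items.foldl
          (fun d wc =>
            ((themes.foldl (fun d p => p.2.foldl (fun d w => d.modify w [] (· ++ [p.1])) d)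
                PySem.Dict.empty).getD wc.1 []).foldl
              (fun d t => d.modify t 0 (· + wc.2)) d)
          (themes.foldl (fun d p => d.insert p.1 (0 : Int)) PySem.Dict.empty)).items := by
  -- A side
  have hA : (themes.foldl
        (fun d p => d.insert p.1 ((p.2.map (fun w => (PySem.Dict.counter tokens).getD w 0)).sum))
        PySem.Dict.empty).items
      = themes.map (fun p => (p.1, (p.2.map (fun w => (PySem.Dict.counter tokens).getD w 0)).sum)) := by
    simpa using PySem.Dict.items_foldl_insert_fresh themes (fun p => p.1)
      (fun p => (p.2.map (fun w => (PySem.Dict.counter tokens).getD w 0)).sum)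
      PySem.Dict.empty (by intro a _; simp) hnd
  -- index characterization
  have hidx : ∀ w, (themes.foldl (fun d p => p.2.foldl (fun d w => d.modify w [] (· ++ [p.1])) d)
        PySem.Dict.empty).getD w []
      = ((themes.flatMap (fun r => r.2.map (fun kw => (kw, r.1)))).filter
          (fun q => q.1 == w)).map (·.2) := by
    intro w
    have hfold : themes.foldl (fun d p => p.2.foldl (fun d w => d.modify w [] (· ++ [p.1])) d)
          PySem.Dict.empty
        = (themes.flatMap (fun r => r.2.map (fun kw => (kw, r.1)))).foldl
            (fun d q => d.modify q.1 [] (· ++ [q.2])) PySem.Dict.empty := by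
      rw [List.foldl_flatMap]
      simp only [List.foldl_map]
    rw [hfold, PySem.Dict.getD_foldl_modify_append]
    simp
  -- scores0
  have h0items : (themes.foldl (fun d p => d.insert p.1 (0 : Int)) PySem.Dict.empty).items
      = themes.map (fun p => (p.1, (0 : Int))) := by
    simpa using PySem.Dict.items_foldl_insert_fresh themes (fun p => p.1) (fun _ => (0 : Int))
      PySem.Dict.empty (by intro a _; simp) hnd
  have h0keys : (themes.foldl (fun d p => d.insert p.1 (0 : Int)) PySem.Dict.empty).keys
      = themes.map (fun p => p.1) := by
    simp [PySem.Dict.keys, h0items]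
  rw [hA]
  symm
  simp only [hidx]
  -- flatten the double fold
  have hflat : (PySem.Dict.counter tokens).items.foldl
        (fun d wc =>
          ((((themes.flatMap (fun r => r.2.map (fun kw => (kw, r.1)))).filter
              (fun q => q.1 == wc.1)).map (·.2)).foldl
            (fun d t => d.modify t 0 (· + wc.2)) d))
        (themes.foldl (fun d p => d.insert p.1 (0 : Int)) PySem.Dict.empty)
      = ((PySem.Dict.counter tokens).items.flatMap
          (fun wc => (((themes.flatMap (fun r => r.2.map (fun kw => (kw, r.1)))).filter
              (fun q => q.1 == wc.1)).map (·.2)).map (fun t => (t, wc.2)))).foldl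
          (fun d q => d.modify q.1 0 (· + q.2))
          (themes.foldl (fun d p => d.insert p.1 (0 : Int)) PySem.Dict.empty) := by
    rw [List.foldl_flatMap]
    simp only [List.foldl_map]
  rw [hflat]
  set Lc := ((PySem.Dict.counter tokens).items.flatMap
      (fun wc => (((themes.flatMap (fun r => r.2.map (fun kw => (kw, r.1)))).filter
          (fun q => q.1 == wc.1)).map (·.2)).map (fun t => (t, wc.2)))) with hLc
  set scores0 := (themes.foldl (fun d p => d.insert p.1 (0 : Int)) PySem.Dict.empty) with hs0
  -- every key touched by Lc is a theme name
  have hLckeys : ∀ q ∈ Lc, q.1 ∈ themes.map (fun p => p.1) := by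
    intro q hq
    rw [hLc] at hq
    obtain ⟨wc, hwc, hq2⟩ := List.mem_flatMap.1 hq
    obtain ⟨t, ht, rfl⟩ := List.mem_map.1 hq2
    obtain ⟨r, hr, rfl⟩ := List.mem_map.1 ht
    obtain ⟨hrF, _⟩ := List.mem_filter.1 hr
    obtain ⟨p, hp, hr2⟩ := List.mem_flatMap.1 hrF
    obtain ⟨kw, hkw, hkweq⟩ := List.mem_map.1 hr2
    subst hkweq
    exact List.mem_map.2 ⟨p, hp, rfl⟩
  -- keys are unchanged by the update fold
  have hkeys : (Lc.foldl (fun d q => d.modify q.1 0 (· + q.2)) scores0).keys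
      = themes.map (fun p => p.1) := by
    rw [PySem.Dict.keys_foldl_modify_key Lc (fun q => q.1) 0 (fun _ q => (· + q.2)) scores0]
    rw [PySem.Set.update_eq_append_filter]
    have hnil : (PySem.Set.ofList (Lc.map (fun q => q.1))).filter
        (fun y => !PySem.Set.contains scores0.keys y) = [] := by
      rw [List.filter_eq_nil_iff]
      intro y hy
      have hy' : y ∈ Lc.map (fun q => q.1) := (PySem.Set.mem_ofList _ y).1 hy
      obtain ⟨q, hq, rfl⟩ := List.mem_map.1 hy'
      have : q.1 ∈ scores0.keys := by rw [h0keys]; exact hLckeys q hq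
      simpa using this
    rw [hnil, List.append_nil, h0keys]
  have hknodup : (Lc.foldl (fun d q => d.modify q.1 0 (· + q.2)) scores0).keys.Nodup := by
    rw [hkeys]; exact hnd
  rw [PySem.Dict.items_eq_map_keys _ hknodup 0, hkeys, List.map_map]
  apply List.map_congr_left
  intro p hp
  simp only [Function.comp]
  congr 1
  -- value at p.1
  rw [pv_getD_foldl_modify_add]
  have h00 : scores0.getD p.1 0 = 0 := by
    apply PySem.Dict.getD_of_mem_items
    · rw [h0items]; exact List.mem_map_of_mem hp
    · rw [h0keys]; exact hnd
  rw [h00, zero_add]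
  rw [hLc, List.filter_flatMap, List.map_flatMap, pv_sum_flatMap]
  have hinner : ∀ wc : String × Int,
      ((((((themes.flatMap (fun r => r.2.map (fun kw => (kw, r.1)))).filter
            (fun q => q.1 == wc.1)).map (·.2)).map (fun t => (t, wc.2))).filter
          (fun q => q.1 == p.1)).map (·.2)).sum
        = (p.2.count wc.1 : Int) * wc.2 := by
    intro wc
    rw [List.filter_map, List.map_map]
    have hlen : (((((themes.flatMap (fun r => r.2.map (fun kw => (kw, r.1)))).filter
          (fun q => q.1 == wc.1)).map (·.2)).filter
            (fun t => ((t, wc.2) : String × Int).1 == p.1))).length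
        = p.2.count wc.1 := by
      rw [← List.countP_eq_length_filter, List.countP_map, List.countP_filter,
        List.countP_flatMap]
      have hper : ∀ r ∈ themes,
          (List.countP (fun q : String × String => (q.2 == p.1) && (q.1 == wc.1)) ∘
            (fun r : String × List String => r.2.map (fun kw => (kw, r.1)))) r
          = if r.1 = p.1 then r.2.count wc.1 else 0 := by
        intro r _
        simp only [Function.comp, List.countP_map]
        by_cases h : r.1 = p.1
        · rw [if_pos h, List.count_eq_countP]
          apply List.countP_congr
          intro kw _
          simp [h]
        · rw [if_neg h]
          refine List.countP_eq_zero.2 ?_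
          intro kw _
          simp [h]
      calc (themes.map (List.countP (fun q : String × String => (q.2 == p.1) && (q.1 == wc.1)) ∘
            (fun r : String × List String => r.2.map (fun kw => (kw, r.1))))).sum
          = (themes.map (fun r => if r.1 = p.1 then r.2.count wc.1 else 0)).sum :=
            congrArg List.sum (List.map_congr_left hper)
        _ = p.2.count wc.1 :=
            pv_sum_map_ite_fst themes p.1 p.2 (fun kws => kws.count wc.1) hnd (by simpa using hp)
    calc ((((((themes.flatMap (fun r => r.2.map (fun kw => (kw, r.1)))).filter
            (fun q => q.1 == wc.1)).map (·.2)).filter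
            (fun t => ((t, wc.2) : String × Int).1 == p.1))).map
              ((fun q : String × Int => q.2) ∘ (fun t => (t, wc.2)))).sum
        = ((((((themes.flatMap (fun r => r.2.map (fun kw => (kw, r.1)))).filter
            (fun q => q.1 == wc.1)).map (·.2)).filter
            (fun t => ((t, wc.2) : String × Int).1 == p.1))).map (fun _ => wc.2)).sum := rfl
      _ = (p.2.count wc.1 : Int) * wc.2 := by
          rw [PySem.List.sum_map_const_int, hlen]
  rw [List.map_congr_left (fun wc _ => hinner wc)]
  rw [PySem.Dict.items_counter, List.map_map]
  have hcomp : ((fun wc : String × Int => (p.2.count wc.1 : Int) * wc.2) ∘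
      (fun k => (k, (tokens.count k : Int)))) = fun w => (p.2.count w : Int) * (tokens.count w : Int) := rfl
  rw [hcomp, pv_sum_count_exchange tokens p.2]
  simp only [PySem.Dict.getD_counter]


theorem lda_eq (tokens : List String) (themes_dict : List (String × List String)) (top_n : Int)
    (hnd : (themes_dict.map (·.1)).Nodup) :
    LDA tokens themes_dict top_n = LDA_alt tokens themes_dict top_n := by
  simp only [LDA, LDA_alt]
  rw [pv_items_eq tokens themes_dict hnd]

-- ===== VERDICT (by name: the statement is the Claim_ definition above) =====
theorem LDA_spec : Claim_equal_LDA := by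
  intro tokens themes_dict top_n _ hpre
  exact lda_eq tokens themes_dict top_n hpre
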